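-- pv_equiv track=rewrite | github.com/wired87/core | qbrain/core/guard.py | is_interaction_eq
-- ===== SOURCE A (Python) =====
-- def is_interaction_eq(params, modules_params:list[str], modules_return_map:list[str]):
--     normalized = [p.replace("_", "") for p in params]
--     has_duplicates = any(normalized.count(np) == 2 for np in set(normalized) if np)
--     prefixed_dublet = any(pid.endswith("_") for pid in params) and any(pid.startswith("_") for pid in params)
--     params_of_different_fields = any(p not in modules_params for p in params) or any(p not in modules_return_map for p in params)
--     if has_duplicates or prefixed_dublet or params_of_different_fields:
--         return True
--     return False
-- ===== SOURCE B (Python) =====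
-- def is_interaction_eq(params, modules_params: list[str], modules_return_map: list[str]):
--     # Duplicate check by sort-then-run-scan: sort the non-empty normalized names,
--     # then walk adjacent runs; a run of length exactly 2 marks a duplicate.
--     sorted_norm = sorted(np for p in params if (np := p.replace("_", "")))
--     has_duplicates = False
--     i, n = 0, len(sorted_norm)
--     while i < n:
--         j = i + 1
--         while j < n and sorted_norm[j] == sorted_norm[i]:
--             j += 1
--         if j - i == 2:
--             has_duplicates = True
--             break
--         i = j
--     prefixed_dublet = any(p.endswith("_") for p in params) and any(p.startswith("_") for p in params)
--     params_of_different_fields = not (set(params) <= set(modules_params)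
--                                       and set(params) <= set(modules_return_map))
--     return has_duplicates or prefixed_dublet or params_of_different_fields
-- ===== Notes on version B (the rewrite author's own statement) =====
-- stated objective: alternative
-- what changed: B detects duplicates by sorting the non-empty normalized names and scanning adjacent runs for one of length exactly 2 (sort-then-group instead of A's per-distinct-key count() rescans), and replaces A's per-element membership passes by two set-inclusion tests set(params) <= set(modules_*).
import Mathlib
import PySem

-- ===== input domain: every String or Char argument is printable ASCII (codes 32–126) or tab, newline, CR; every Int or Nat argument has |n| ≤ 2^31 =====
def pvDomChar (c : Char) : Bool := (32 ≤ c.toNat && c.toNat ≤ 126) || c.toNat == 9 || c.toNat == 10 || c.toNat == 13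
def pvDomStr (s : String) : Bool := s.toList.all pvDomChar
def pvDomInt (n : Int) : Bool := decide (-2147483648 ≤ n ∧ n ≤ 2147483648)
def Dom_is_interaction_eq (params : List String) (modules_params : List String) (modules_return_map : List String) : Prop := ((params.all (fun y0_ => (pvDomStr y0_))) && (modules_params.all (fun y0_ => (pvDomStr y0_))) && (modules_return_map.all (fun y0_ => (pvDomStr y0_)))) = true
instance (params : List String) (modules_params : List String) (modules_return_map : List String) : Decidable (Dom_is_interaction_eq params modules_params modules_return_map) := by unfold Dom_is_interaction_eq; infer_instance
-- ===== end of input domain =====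

-- B finds duplicates by sorting the non-empty normalized names and scanning adjacent runs
-- (instead of A's count() per distinct key), and tests field membership by set inclusion.

-- ===== PORT A =====
def is_interaction_eq (params : List String) (modules_params : List String) (modules_return_map : List String) : Bool :=
  let normalized := params.map (fun p => PySem.Str.replace p "_" "")
  let has_duplicates := (PySem.Set.ofList normalized).any (fun np => (!(np == "")) && (normalized.count np == 2))
  let prefixed_dublet := (params.any (fun pid => PySem.Str.endswith pid "_")) && (params.any (fun pid => PySem.Str.startswith pid "_"))
  let params_of_different_fields := (params.any (fun p => !(modules_params.contains p))) || (params.any (fun p => !(modules_return_map.contains p)))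
  if has_duplicates || prefixed_dublet || params_of_different_fields then true else false

-- ===== PORT B =====
-- the run scan of B's while loop: walk maximal runs of equal adjacent elements,
-- true iff some run has length exactly 2 (j - i == 2 in Source B)
def pvRunScan : List String → Bool
  | [] => false
  | x :: rest =>
    if (rest.takeWhile (fun y => y == x)).length + 1 = 2 then true
    else pvRunScan (rest.dropWhile (fun y => y == x))
termination_by s => s.length
decreasing_by
  have := List.length_dropWhile_le (fun y => y == x) rest
  simp only [List.length_cons]
  omega

def is_interaction_eq_alt (params : List String) (modules_params : List String) (modules_return_map : List String) : Bool :=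
  let sorted_norm := PySem.List.sorted ((params.map (fun p => PySem.Str.replace p "_" "")).filter (fun np => !(np == ""))) (fun x => x) false
  let has_duplicates := pvRunScan sorted_norm
  let prefixed_dublet := (params.any (fun p => PySem.Str.endswith p "_")) && (params.any (fun p => PySem.Str.startswith p "_"))
  let params_of_different_fields := !(PySem.Set.issubset (PySem.Set.ofList params) modules_params && PySem.Set.issubset (PySem.Set.ofList params) modules_return_map)
  has_duplicates || prefixed_dublet || params_of_different_fields

-- ===== PRECONDITION & SPEC =====
def Spec_is_interaction_eq (params : List String) (modules_params : List String) (modules_return_map : List String) (out : Bool) : Prop := out = is_interaction_eq_alt params modules_params modules_return_map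
instance (params : List String) (modules_params : List String) (modules_return_map : List String) (out : Bool) : Decidable (Spec_is_interaction_eq params modules_params modules_return_map out) := by unfold Spec_is_interaction_eq; infer_instance

-- ===== CLAIM =====
def Claim_equal_is_interaction_eq : Prop := ∀ (params : List String) (modules_params : List String) (modules_return_map : List String), Dom_is_interaction_eq params modules_params modules_return_map → Spec_is_interaction_eq params modules_params modules_return_map (is_interaction_eq params modules_params modules_return_map)

-- ===== LEMMAS AND PROOFS =====

-- on a ≤-sorted list, the run scan is true iff some element occurs exactly twice
theorem pv_runScan_sorted : ∀ (n : Nat) (s : List String), s.length ≤ n → s.Pairwise (· ≤ ·) →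
    pvRunScan s = s.any (fun y => s.count y == 2) := by
  intro n
  induction n with
  | zero =>
    intro s hlen _
    have : s = [] := List.eq_nil_of_length_eq_zero (Nat.le_zero.mp hlen)
    subst this; simp [pvRunScan]
  | succ m ih =>
    intro s hlen hs
    match s with
    | [] => simp [pvRunScan]
    | x :: rest =>
      have hx_rest : ∀ y ∈ rest, x ≤ y := fun y hy => (List.pairwise_cons.mp hs).1 y hy
      have hrest : rest.Pairwise (· ≤ ·) := (List.pairwise_cons.mp hs).2
      obtain ⟨run, tail, hrun, htail⟩ :
          ∃ run tail, run = rest.takeWhile (fun y => y == x) ∧ tail = rest.dropWhile (fun y => y == x) :=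
        ⟨_, _, rfl, rfl⟩
      have hsplit : rest = run ++ tail := by
        rw [hrun, htail]; exact (List.takeWhile_append_dropWhile).symm
      have hrun_eq : ∀ y ∈ run, y = x := by
        intro y hy
        rw [hrun] at hy
        exact eq_of_beq (List.mem_takeWhile_imp (p := fun y => y == x) (l := rest) hy)
      have htail_gt : ∀ y ∈ tail, x < y := by
        cases hc : tail with
        | nil => intro y hy; simp at hy
        | cons z t =>
          have h1 := List.head_dropWhile_not (p := fun y => y == x) (l := rest)
          rw [← htail, hc] at h1
          have hz_ne : (z == x) = false := by simpa using h1 (by simp)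
          have hz_ne' : z ≠ x := fun h => by simp [h] at hz_ne
          have hz_mem : z ∈ rest := by rw [hsplit, hc]; simp
          have hzx : x < z := lt_of_le_of_ne (hx_rest z hz_mem) (Ne.symm hz_ne')
          intro y hy
          rcases (show y = z ∨ y ∈ t by simpa [hc] using hy) with h | h
          · subst h; exact hzx
          · have htp : (z :: t).Pairwise (· ≤ ·) := by
              rw [← hc, htail]; exact hrest.sublist (List.dropWhile_sublist _)
            exact lt_of_lt_of_le hzx ((List.pairwise_cons.mp htp).1 y h)
      have htail_ne : ∀ y ∈ tail, y ≠ x := fun y hy h => absurd (htail_gt y hy) (by simp [h])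
      have htail0 : tail.count x = 0 := List.count_eq_zero.mpr (fun h => htail_ne x h rfl)
      have hruncx : run.count x = run.length := by
        rw [List.count_eq_length]
        intro y hy
        exact (hrun_eq y hy) ▸ rfl
      have hcount_x : (x :: rest).count x = run.length + 1 := by
        rw [hsplit]
        simp [List.count_append, htail0, hruncx]
      have hcount_tail : ∀ y ∈ tail, (x :: rest).count y = tail.count y := by
        intro y hy
        have hrun0 : run.count y = 0 :=
          List.count_eq_zero.mpr (fun h => htail_ne y hy (hrun_eq y h))
        have hxy : ¬ x = y := fun h => htail_ne y hy h.symm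
        rw [hsplit]
        simp [List.count_append, hrun0, hxy]
      have htail_pw : tail.Pairwise (· ≤ ·) := by
        rw [htail]; exact hrest.sublist (List.dropWhile_sublist _)
      have htail_len : tail.length ≤ m := by
        have h1 := List.length_dropWhile_le (fun y => y == x) rest
        rw [← htail] at h1
        simp only [List.length_cons] at hlen
        omega
      rw [pvRunScan]
      rw [← hrun, ← htail]
      by_cases hcase : run.length + 1 = 2
      · rw [if_pos hcase]
        have hx2 : ((x :: rest).count x == 2) = true := by rw [hcount_x]; simp [hcase]
        exact (List.any_eq_true.mpr ⟨x, by simp, hx2⟩).symm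
      · rw [if_neg hcase]
        rw [ih tail htail_len htail_pw]
        apply Bool.eq_iff_iff.mpr
        simp only [List.any_eq_true]
        constructor
        · rintro ⟨y, hy, h2⟩
          refine ⟨y, ?_, ?_⟩
          · rw [hsplit]; simp [hy]
          · rw [hcount_tail y hy]; exact h2
        · rintro ⟨y, hy, h2⟩
          by_cases hyx : y = x
          · subst hyx
            rw [hcount_x] at h2
            simp only [beq_iff_eq] at h2
            exact absurd h2 hcase
          · have hy_tail : y ∈ tail := by
              rcases List.mem_cons.mp hy with h | h
              · exact absurd h hyx
              · rw [hsplit] at h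
                rcases List.mem_append.mp h with h | h
                · exact absurd (hrun_eq y h) hyx
                · exact h
            exact ⟨y, hy_tail, by rw [← hcount_tail y hy_tail]; exact h2⟩

-- set(params) <= set(xs) fails iff some param is missing from xs
theorem pv_not_subset (params xs : List String) :
    (!PySem.Set.issubset (PySem.Set.ofList params) xs) = params.any (fun p => !(xs.contains p)) := by
  have h : PySem.Set.issubset (PySem.Set.ofList params) xs = params.all (fun p => xs.contains p) := by
    apply Bool.eq_iff_iff.mpr
    rw [PySem.Set.issubset_iff]
    simp [List.all_eq_true, PySem.Set.mem_ofList]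
  rw [h, List.not_all_eq_any_not]

-- ===== VERDICT =====
theorem is_interaction_eq_spec : Claim_equal_is_interaction_eq := by
  intro params mp mr _
  unfold Spec_is_interaction_eq
  simp only [is_interaction_eq, is_interaction_eq_alt]
  set normalized := params.map (fun p => PySem.Str.replace p "_" "") with hnorm
  set filtered := normalized.filter (fun np => !(np == "")) with hfilt
  set sorted_norm := PySem.List.sorted filtered (fun x => x) false with hsort
  have hperm : sorted_norm.Perm filtered := PySem.List.sorted_perm filtered (fun x => x) false
  have hpw : sorted_norm.Pairwise (· ≤ ·) := by
    have := PySem.List.sorted_pairwise filtered (fun x => x)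
    simpa using this
  have hdup : pvRunScan sorted_norm
      = (PySem.Set.ofList normalized).any (fun np => (!(np == "")) && (normalized.count np == 2)) := by
    rw [pv_runScan_sorted sorted_norm.length sorted_norm le_rfl hpw]
    apply Bool.eq_iff_iff.mpr
    simp only [List.any_eq_true]
    constructor
    · rintro ⟨y, hy, h2⟩
      have hyf : y ∈ filtered := hperm.mem_iff.mp hy
      have hyn : y ∈ normalized := List.mem_of_mem_filter hyf
      have hne : (y == "") = false := by simpa using List.of_mem_filter hyf
      refine ⟨y, (PySem.Set.mem_ofList _ _).mpr hyn, ?_⟩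
      have hc : sorted_norm.count y = normalized.count y := by
        rw [hperm.count_eq, hfilt, List.count_filter]; simp [hne]
      rw [hc] at h2; simp [hne, h2]
    · rintro ⟨y, hy, h2⟩
      simp only [Bool.and_eq_true, Bool.not_eq_true'] at h2
      obtain ⟨hne, h2⟩ := h2
      have hyn : y ∈ normalized := (PySem.Set.mem_ofList _ _).mp hy
      have hyf : y ∈ filtered := List.mem_filter.mpr ⟨hyn, by simp [hne]⟩
      refine ⟨y, hperm.mem_iff.mpr hyf, ?_⟩
      have hc : sorted_norm.count y = normalized.count y := by
        rw [hperm.count_eq, hfilt, List.count_filter]; simp [hne]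
      rw [hc]; exact h2
  have hmem : (!(PySem.Set.issubset (PySem.Set.ofList params) mp && PySem.Set.issubset (PySem.Set.ofList params) mr))
      = ((params.any (fun p => !(mp.contains p))) || (params.any (fun p => !(mr.contains p)))) := by
    rw [Bool.not_and, pv_not_subset params mp, pv_not_subset params mr]
  rw [hdup, hmem]
  split
  · next h => exact h.symm
  · next h => exact (Bool.of_not_eq_true h).symm
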